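-- pv_equiv track=rewrite | github.com/ElCuboNegro/rosetta | src/rosetta_dict/pipelines/wiktionary_parsing/nodes.py | _extract_translations
-- ===== SOURCE A (Python) =====
-- from typing import List, Dict, Any
--
-- def _extract_translations(entry: Dict[str, Any], lang_codes: List[str]) -> Dict[str, List[str]]:
--     """Extract translations for specified language codes.
--
--     Args:
--         entry: Wiktionary entry dictionary.
--         lang_codes: List of language codes to extract (e.g., ["en", "fr", "he"]).
--
--     Returns:
--         Dictionary mapping language codes to lists of translations.
--     """
--     result = {code: [] for code in lang_codes}
--
--     translations = entry.get("translations", [])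
--     for trans in translations:
--         lang_code = trans.get("lang_code")  # Most Wiktionaries use "lang_code"
--         trans_word = trans.get("word", "")
--
--         if not trans_word or lang_code not in lang_codes:
--             continue
--
--         if trans_word not in result[lang_code]:
--             result[lang_code].append(trans_word)
--
--     return result
-- ===== SOURCE B (Python) =====
-- from typing import List, Dict, Any
--
-- def _extract_translations(entry: Dict[str, Any], lang_codes: List[str]) -> Dict[str, List[str]]:
--     translations = entry.get("translations", [])
--     return {
--         code: list(dict.fromkeys(
--             t.get("word", "") for t in translations
--             if t.get("word", "") and t.get("lang_code") == code
--         ))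
--         for code in lang_codes
--     }
-- ===== Notes on version B (the rewrite author's own statement) =====
-- stated objective: alternative
-- what changed: B inverts the loop nesting: instead of one pass over translations with a membership check into a pre-initialized dict, B builds the dict per language code, collecting that code's matching words from translations and deduplicating them in one dict.fromkeys shot.
import Mathlib
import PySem

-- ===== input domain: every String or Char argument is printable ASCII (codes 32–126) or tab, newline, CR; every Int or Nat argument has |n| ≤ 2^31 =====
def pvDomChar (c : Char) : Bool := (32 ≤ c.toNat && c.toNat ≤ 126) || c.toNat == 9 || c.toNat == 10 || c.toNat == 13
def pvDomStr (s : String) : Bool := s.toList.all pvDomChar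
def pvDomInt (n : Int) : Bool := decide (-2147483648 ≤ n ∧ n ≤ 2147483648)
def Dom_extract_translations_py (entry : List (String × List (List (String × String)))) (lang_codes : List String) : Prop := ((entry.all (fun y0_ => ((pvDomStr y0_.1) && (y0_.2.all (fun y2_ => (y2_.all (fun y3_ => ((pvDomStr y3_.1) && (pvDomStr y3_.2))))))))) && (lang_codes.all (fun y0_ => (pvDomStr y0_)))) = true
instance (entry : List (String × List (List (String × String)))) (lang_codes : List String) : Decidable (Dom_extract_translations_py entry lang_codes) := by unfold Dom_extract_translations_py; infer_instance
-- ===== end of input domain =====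

-- B inverts the loop nesting: one dict-comprehension pass per language code, each collecting and
-- deduplicating that code's words, instead of A's single translations loop with a membership check.

-- A-side helper: Python's `lang_code in lang_codes` where lang_code may be None
def pvLangIn (o : Option String) (codes : List String) : Bool :=
  match o with
  | some c => codes.contains c
  | none => false

-- ===== PORT A =====
def extract_translations_py (entry : List (String × List (List (String × String)))) (lang_codes : List String) : List (String × List String) :=
  -- result = {code: [] for code in lang_codes}
  let result : PySem.Dict String (List String) :=
    lang_codes.foldl (fun d c => d.insert c []) PySem.Dict.empty
  -- translations = entry.get("translations", [])
  let translations := (PySem.Dict.mk entry).getD "translations" []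
  -- for trans in translations: interleaved membership check + append
  let final := translations.foldl (fun res trans =>
    let lang_code := (PySem.Dict.mk trans).get? "lang_code"
    let trans_word := (PySem.Dict.mk trans).getD "word" ""
    if trans_word = "" ∨ pvLangIn lang_code lang_codes = false then res
    else
      match lang_code with
      | some c =>
          let cur := res.getD c []
          if trans_word ∈ cur then res else res.insert c (cur ++ [trans_word])
      | none => res) result
  final.items

-- ===== PORT B =====
def extract_translations_py_alt (entry : List (String × List (List (String × String)))) (lang_codes : List String) : List (String × List String) :=
  let translations := (PySem.Dict.mk entry).getD "translations" []
  -- {code: list(dict.fromkeys(word for t in translations if word and t.get("lang_code") == code)) for code in lang_codes}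
  (lang_codes.foldl (fun d code =>
      d.insert code (PySem.List.dedup (translations.filterMap (fun t =>
        let w := (PySem.Dict.mk t).getD "word" ""
        if w ≠ "" ∧ (PySem.Dict.mk t).get? "lang_code" = some code then some w else none))))
    PySem.Dict.empty).items

-- ===== PRECONDITION & SPEC =====
def Spec_extract_translations_py (entry : List (String × List (List (String × String)))) (lang_codes : List String) (out : List (String × List String)) : Prop := out = extract_translations_py_alt entry lang_codes
instance (entry : List (String × List (List (String × String)))) (lang_codes : List String) (out : List (String × List String)) : Decidable (Spec_extract_translations_py entry lang_codes out) := by unfold Spec_extract_translations_py; infer_instance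

-- ===== CLAIM (what is proved, stated in full; the proofs are below) =====
def Claim_equal_extract_translations_py : Prop := ∀ (entry : List (String × List (List (String × String)))) (lang_codes : List String), Dom_extract_translations_py entry lang_codes → Spec_extract_translations_py entry lang_codes (extract_translations_py entry lang_codes)

-- ===== LEMMAS AND PROOFS =====

-- the words of `translations` that match code c (B's per-code filter)
def pvWl (c : String) (ts : List (List (String × String))) : List String :=
  ts.filterMap (fun t =>
    let w := (PySem.Dict.mk t).getD "word" ""
    if w ≠ "" ∧ (PySem.Dict.mk t).get? "lang_code" = some c then some w else none)

-- A's append-if-absent step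
def pvStep (acc : List String) (w : String) : List String :=
  if w ∈ acc then acc else acc ++ [w]

theorem pv_dedup_append (ws : List String) (w : String) :
    PySem.List.dedup (ws ++ [w]) =
      if w ∈ ws then PySem.List.dedup ws else PySem.List.dedup ws ++ [w] := by
  rw [PySem.List.dedup_eq_ofList, PySem.Set.ofList_append, PySem.Set.update_cons,
    PySem.Set.update_nil, PySem.List.dedup_eq_ofList]
  by_cases h : w ∈ ws
  · rw [if_pos h]; simp [PySem.Set.add, PySem.Set.mem_ofList, h]
  · rw [if_neg h]; simp [PySem.Set.add, PySem.Set.mem_ofList, h]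

theorem pv_foldl_step_dedup (ws : List String) :
    ∀ xs : List String, ws.foldl pvStep (PySem.List.dedup xs) = PySem.List.dedup (xs ++ ws) := by
  induction ws with
  | nil => intro xs; simp
  | cons w ws ih =>
    intro xs
    have h1 : pvStep (PySem.List.dedup xs) w = PySem.List.dedup (xs ++ [w]) := by
      rw [pv_dedup_append, pvStep]
      by_cases h : w ∈ xs
      · rw [if_pos h, if_pos (by rw [PySem.List.mem_dedup]; exact h)]
      · rw [if_neg h, if_neg (by rw [PySem.List.mem_dedup]; exact h)]
    rw [List.foldl_cons, h1, ih (xs ++ [w]), List.append_assoc]; rfl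

theorem pv_foldl_step_nil (ws : List String) :
    ws.foldl pvStep [] = PySem.List.dedup ws := by
  have h := pv_foldl_step_dedup ws []
  simpa using h

-- A's loop, characterized pointwise on the items of any dict whose keys are exactly lang_codes
theorem pv_main (lang_codes : List String) (ts : List (List (String × String))) :
    ∀ d : PySem.Dict String (List String), d.keys.Nodup →
    (∀ c, c ∈ d.keys ↔ c ∈ lang_codes) →
    ts.foldl (fun res trans =>
      let lang_code := (PySem.Dict.mk trans).get? "lang_code"
      let trans_word := (PySem.Dict.mk trans).getD "word" ""
      if trans_word = "" ∨ pvLangIn lang_code lang_codes = false then res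
      else
        match lang_code with
        | some c =>
            let cur := res.getD c []
            if trans_word ∈ cur then res else res.insert c (cur ++ [trans_word])
        | none => res) d
    = PySem.Dict.mk (d.items.map (fun p => (p.1, (pvWl p.1 ts).foldl pvStep p.2))) := by
  induction ts with
  | nil =>
    intro d _ _
    simp only [List.foldl_nil, pvWl, List.filterMap_nil]
    refine (PySem.Dict.ext ?_).symm
    simp
  | cons t ts ih =>
    intro d hnd hkeys
    simp only [List.foldl_cons]
    set w := (PySem.Dict.mk t).getD "word" "" with hw
    set lc := (PySem.Dict.mk t).get? "lang_code" with hlc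
    by_cases hskip : (w = "" ∨ pvLangIn lc lang_codes = false)
    · rw [if_pos hskip, ih d hnd hkeys]
      congr 1
      apply List.map_congr_left
      intro p hp
      have hpk : p.1 ∈ lang_codes := (hkeys p.1).mp (PySem.Dict.mem_keys_of_mem_items d hp)
      have : pvWl p.1 (t :: ts) = pvWl p.1 ts := by
        simp only [pvWl, List.filterMap_cons]
        rw [if_neg]
        rintro ⟨hwne, hlceq⟩
        rcases hskip with h | h
        · exact hwne h
        · rw [hlc, hlceq] at h; simp [pvLangIn, hpk] at h
      rw [this]
    · rw [if_neg hskip]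
      push Not at hskip
      obtain ⟨hwne, hlcin⟩ := hskip
      have hlcin' : pvLangIn lc lang_codes = true := by
        cases h : pvLangIn lc lang_codes
        · exact absurd h hlcin
        · rfl
      obtain ⟨c0, hc0⟩ : ∃ c0, lc = some c0 := by
        cases h : lc with
        | none => rw [h] at hlcin'; exact absurd hlcin' (by simp [pvLangIn])
        | some c => exact ⟨c, rfl⟩
      have hc0in : c0 ∈ lang_codes := by
        rw [hc0] at hlcin'; simpa [pvLangIn, List.contains_iff_mem] using hlcin'
      rw [hc0]
      set cur := d.getD c0 [] with hcur
      -- both branches are d.insert c0 (pvStep cur w)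
      have hbranch :
          (if w ∈ cur then d else d.insert c0 (cur ++ [w])) = d.insert c0 (pvStep cur w) := by
        have hc0keys : c0 ∈ d.keys := (hkeys c0).mpr hc0in
        obtain ⟨v, hv⟩ : ∃ v, d.get? c0 = some v := by
          cases h : d.get? c0 with
          | none => exact absurd ((PySem.Dict.get?_eq_none_iff_not_mem_keys d c0).mp h) (by simpa using hc0keys)
          | some v => exact ⟨v, rfl⟩
        have hcv : cur = v := by rw [hcur, PySem.Dict.getD_eq_get?_getD, hv]; rfl
        by_cases hmem : w ∈ cur
        · rw [if_pos hmem, pvStep, if_pos hmem]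
          -- insert of the present value is the identity
          apply (PySem.Dict.ext _).symm
          rw [PySem.Dict.items_insert, if_pos (by rw [PySem.Dict.contains_eq_isSome_get?, hv]; rfl)]
          conv_rhs => rw [← List.map_id d.items]
          apply List.map_congr_left
          intro p hp
          by_cases hpk : p.1 == c0
          · have hmemi : (c0, v) ∈ d.items := PySem.Dict.mem_items_of_get?_eq_some d hv
            have : p = (c0, v) := by
              have hinj := List.inj_on_of_nodup_map (f := Prod.fst) (l := d.items) hnd
              exact hinj hp hmemi (by simpa using hpk)
            simp [this, hcv]
          · simp [hpk]
        · rw [if_neg hmem, pvStep, if_neg hmem]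
      have hb2 : (match some c0 with
          | some c => if w ∈ d.getD c [] then d else d.insert c (d.getD c [] ++ [w])
          | none => d) = d.insert c0 (pvStep cur w) := hbranch
      rw [hb2]
      have hnd' : (d.insert c0 (pvStep cur w)).keys.Nodup := PySem.Dict.nodup_keys_insert _ _ _ hnd
      have hkeys' : ∀ c, c ∈ (d.insert c0 (pvStep cur w)).keys ↔ c ∈ lang_codes := by
        intro c
        rw [PySem.Dict.mem_keys_insert]
        constructor
        · rintro (rfl | h)
          · exact hc0in
          · exact (hkeys c).mp h
        · intro h; exact Or.inr ((hkeys c).mpr h)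
      rw [ih _ hnd' hkeys']
      congr 1
      have hcont : d.contains c0 = true := by
        rw [PySem.Dict.contains_eq_decide_mem_keys]; simp [(hkeys c0).mpr hc0in]
      rw [PySem.Dict.items_insert, if_pos hcont, List.map_map]
      apply List.map_congr_left
      intro p hp
      by_cases hpk : p.1 == c0
      · have hpk' : p.1 = c0 := by simpa using hpk
        have hpv : p.2 = cur := by
          have : d.getD p.1 [] = p.2 := PySem.Dict.getD_of_mem_items d (by simpa using hp) hnd []
          rw [hcur, ← hpk', this]
        have hwl : pvWl c0 (t :: ts) = w :: pvWl c0 ts := by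
          simp only [pvWl, List.filterMap_cons]
          rw [if_pos ⟨hwne, by rw [← hlc, hc0]⟩]
        simp only [Function.comp, hpk, if_pos]
        simp only [hpk', hwl, List.foldl_cons, hpv]
      · have hpk' : p.1 ≠ c0 := by simpa using hpk
        have hwl : pvWl p.1 (t :: ts) = pvWl p.1 ts := by
          simp only [pvWl, List.filterMap_cons]
          rw [if_neg]
          rintro ⟨_, hlceq⟩
          rw [← hlc, hc0] at hlceq
          exact hpk' (Option.some_injective _ hlceq).symm
        simp only [Function.comp, hpk, if_neg, Bool.false_eq_true, not_false_iff]
        rw [hwl]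

-- the initial dict {code: [] for code in lang_codes}: membership and all-values-[]
theorem pv_init_mem (codes : List String) (k : String) :
    ∀ d : PySem.Dict String (List String),
      (k ∈ (codes.foldl (fun d c => d.insert c ([] : List String)) d).keys ↔ k ∈ codes ∨ k ∈ d.keys) := by
  induction codes with
  | nil => intro d; simp
  | cons c cs ih =>
    intro d
    rw [List.foldl_cons, ih, PySem.Dict.mem_keys_insert]
    constructor
    · rintro (h | rfl | h)
      · exact Or.inl (List.mem_cons_of_mem _ h)
      · exact Or.inl (List.mem_cons_self)
      · exact Or.inr h
    · rintro (h | h)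
      · rcases List.mem_cons.mp h with rfl | h
        · exact Or.inr (Or.inl rfl)
        · exact Or.inl h
      · exact Or.inr (Or.inr h)

theorem pv_init_vals (codes : List String) :
    ∀ d : PySem.Dict String (List String), (∀ p ∈ d.items, p.2 = []) →
      ∀ p ∈ (codes.foldl (fun d c => d.insert c ([] : List String)) d).items, p.2 = [] := by
  induction codes with
  | nil => intro d h; exact h
  | cons c cs ih =>
    intro d h
    rw [List.foldl_cons]
    apply ih
    intro p hp
    rcases (PySem.Dict.mem_items_insert _ _ _ _).mp hp with rfl | ⟨hp', _⟩
    · rfl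
    · exact h p hp'

-- pushing a key-determined value map through the building fold
def pvVal (f : String → List String) (d : PySem.Dict String (List String)) : PySem.Dict String (List String) :=
  PySem.Dict.mk (d.items.map (fun p => (p.1, f p.1)))

theorem pvVal_insert (f : String → List String) (d : PySem.Dict String (List String)) (k : String) (v : List String) :
    pvVal f (d.insert k v) = (pvVal f d).insert k (f k) := by
  apply PySem.Dict.ext
  show (d.insert k v).items.map _ = _
  rw [PySem.Dict.items_insert, PySem.Dict.items_insert]
  have hc : (pvVal f d).contains k = d.contains k := by
    rw [PySem.Dict.contains_eq_decide_mem_keys, PySem.Dict.contains_eq_decide_mem_keys]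
    have : (pvVal f d).keys = d.keys := by
      simp only [PySem.Dict.keys, pvVal, List.map_map]; rfl
    rw [this]
  rw [hc]
  by_cases h : d.contains k
  · rw [if_pos h, if_pos h]
    show _ = (d.items.map (fun p => (p.1, f p.1))).map _
    rw [List.map_map, List.map_map]
    apply List.map_congr_left
    intro p _
    by_cases hp : p.1 == k
    · have : p.1 = k := by simpa using hp
      simp [Function.comp, this]
    · simp [Function.comp, hp]
  · rw [if_neg h, if_neg h]
    simp [pvVal]

theorem pvVal_init (f : String → List String) (codes : List String) :
    ∀ d : PySem.Dict String (List String),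
      pvVal f (codes.foldl (fun d c => d.insert c ([] : List String)) d)
        = codes.foldl (fun d c => d.insert c (f c)) (pvVal f d) := by
  induction codes with
  | nil => intro d; rfl
  | cons c cs ih =>
    intro d
    simp only [List.foldl_cons, ih, pvVal_insert]

-- ===== VERDICT (by name: the statement is the Claim_ definition above) =====
theorem extract_translations_py_spec : Claim_equal_extract_translations_py := by
  intro entry lang_codes _
  unfold Spec_extract_translations_py extract_translations_py extract_translations_py_alt
  dsimp only
  set ts := (PySem.Dict.mk entry).getD "translations" [] with hts
  set init : PySem.Dict String (List String) :=
    lang_codes.foldl (fun d c => d.insert c []) PySem.Dict.empty with hinit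
  have hnd : init.keys.Nodup :=
    PySem.Dict.nodup_keys_foldl_insert _ _ _ PySem.Dict.nodup_keys_empty
  have hkeys : ∀ c, c ∈ init.keys ↔ c ∈ lang_codes := by
    intro c
    rw [hinit, pv_init_mem]
    simp [PySem.Dict.keys_empty]
  have hvals : ∀ p ∈ init.items, p.2 = [] := by
    rw [hinit]
    exact pv_init_vals lang_codes PySem.Dict.empty (by intro p hp; simp [PySem.Dict.empty] at hp)
  rw [pv_main lang_codes ts init hnd hkeys]
  show (init.items.map (fun p => (p.1, (pvWl p.1 ts).foldl pvStep p.2))) = _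
  have hmap : init.items.map (fun p => (p.1, (pvWl p.1 ts).foldl pvStep p.2))
      = init.items.map (fun p => (p.1, PySem.List.dedup (pvWl p.1 ts))) := by
    apply List.map_congr_left
    intro p hp
    rw [hvals p hp, pv_foldl_step_nil]
  rw [hmap]
  show (pvVal (fun c => PySem.List.dedup (pvWl c ts)) init).items = _
  rw [hinit, pvVal_init]
  rfl
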